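-- pv_equiv track=rewrite | github.com/Mr-knick/Demo | PythonPracticeProblems/ComputerID.py | ComputeNewID
-- ===== SOURCE A (Python) =====
-- def ComputeNewID(n, b):
--     DigitList = [digit for digit in str(n)]
--     DigitList.sort()
--     DecDigitList = DigitList[::-1]
--     y = int(''.join(DigitList), b)
--     x = int(''.join(DecDigitList), b)
--     z = x - y
--     return ConvertB10toBb(z, b).zfill(len(str(n)))
--
-- def ConvertB10toBb(n, b):
--     Digit = n // b
--     Remainder = n % b
--     if n == 0:
--         return "0"
--     elif Digit == 0:
--         return str(Remainder)
--     else: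
--         return str(ConvertB10toBb(Digit, b)) + str(Remainder)
-- ===== SOURCE B (Python) =====
-- def ComputeNewID(n, b):
--     digits = sorted(str(n))
--     y = int(''.join(digits), b)
--     x = int(''.join(reversed(digits)), b)
--     z = x - y
--     if z == 0:
--         s = "0"
--     else:
--         out = []
--         while z > 0:
--             out.append(str(z % b))
--             z //= b
--         s = ''.join(reversed(out))
--     return s.zfill(len(str(n)))
-- ===== Notes on version B (the rewrite author's own statement) =====
-- stated objective: simpler
-- what changed: Replaces the recursive ConvertB10toBb helper with a single flat function that converts z to base b by an iterative while-loop collecting remainders and joining them in reverse; the digit-sorting and the two int(...,b) parses are kept so the domain of definition is unchanged.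
import Mathlib
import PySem

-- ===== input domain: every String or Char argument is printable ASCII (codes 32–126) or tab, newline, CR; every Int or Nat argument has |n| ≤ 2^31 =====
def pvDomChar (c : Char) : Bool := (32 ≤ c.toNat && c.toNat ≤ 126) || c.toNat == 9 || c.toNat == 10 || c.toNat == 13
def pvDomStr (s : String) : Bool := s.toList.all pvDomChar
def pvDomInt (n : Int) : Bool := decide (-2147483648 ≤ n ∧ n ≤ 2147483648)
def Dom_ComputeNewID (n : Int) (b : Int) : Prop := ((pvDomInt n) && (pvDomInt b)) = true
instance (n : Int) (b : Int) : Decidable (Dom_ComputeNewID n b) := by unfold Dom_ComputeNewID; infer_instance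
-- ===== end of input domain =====

-- B replaces A's recursive base-conversion helper by one flat iterative remainder loop; objective: simpler.

-- ===== PORT A =====
-- ConvertB10toBb, fuel-bounded (the fuel only makes the Python recursion total; on admitted
-- inputs the recursion depth is below the fuel, and the "" default is never reached).
def pvConvFuel : Nat → Int → Int → List Char
  | 0, _, _ => []
  | f + 1, n, b =>
    let Digit := PySem.Int.floordiv n b
    let Remainder := PySem.Int.mod n b
    if n = 0 then ['0']
    else if Digit = 0 then PySem.Int.toChars Remainder
    else pvConvFuel f Digit b ++ PySem.Int.toChars Remainder

-- fuel n.toNat + 1 bounds the recursion depth for n ≥ 0 (each step divides by b ≥ 2);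
-- for n < 0 the Python recursion never terminates (RecursionError), so no fuel is granted
def ConvertB10toBb (n : Int) (b : Int) : List Char :=
  pvConvFuel (if 0 ≤ n then n.toNat + 1 else 0) n b

def ComputeNewID (n : Int) (b : Int) : String :=
  let DigitList := PySem.List.sorted (PySem.Int.toChars n) (fun c => c) false
  let DecDigitList := (PySem.List.slice? DigitList none none (-1)).getD []   -- DigitList[::-1]
  let y := (PySem.Int.ofCharsBase? DigitList b).getD 0      -- int(''.join(DigitList), b); none = ValueError, outside Pre_
  let x := (PySem.Int.ofCharsBase? DecDigitList b).getD 0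
  let z := x - y
  String.ofList (PySem.Chars.zfill (ConvertB10toBb z b) (PySem.Int.toChars n).length)

-- ===== PORT B =====
-- the while-loop of Source B: out.append(str(z % b)); z //= b   (fuel = iteration bound)
def pvAltLoop : Nat → Int → Int → List (List Char) → List (List Char)
  | 0, _, _, acc => acc
  | f + 1, z, b, acc =>
    if 0 < z then pvAltLoop f (PySem.Int.floordiv z b) b (acc ++ [PySem.Int.toChars (PySem.Int.mod z b)])
    else acc

def ComputeNewID_alt (n : Int) (b : Int) : String :=
  let digits := PySem.List.sorted (PySem.Int.toChars n) (fun c => c) false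
  let y := (PySem.Int.ofCharsBase? digits b).getD 0
  let x := (PySem.Int.ofCharsBase? digits.reverse b).getD 0
  let z := x - y
  let s := if z = 0 then ['0'] else ((pvAltLoop z.toNat z b []).reverse).flatten   -- ''.join(reversed(out)) = concatenation, exact
  String.ofList (PySem.Chars.zfill s (PySem.Int.toChars n).length)

-- ===== PRECONDITION & SPEC =====
-- Pre_ excludes exactly the inputs on which the Python A raises: negative n (the sorted digit
-- strings then carry a misplaced '-' and int(...) raises ValueError), bases outside 2..36
-- (ValueError from int(...,b), or ZeroDivisionError for b = 0), and a decimal digit of n ≥ b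
-- (ValueError). On every other input A returns normally.
def Pre_ComputeNewID (n : Int) (b : Int) : Prop :=
  0 ≤ n ∧ 2 ≤ b ∧ b ≤ 36 ∧ ((PySem.Int.toChars n).all (fun c => (c.toNat : Int) - 48 < b)) = true
instance (n : Int) (b : Int) : Decidable (Pre_ComputeNewID n b) := by unfold Pre_ComputeNewID; infer_instance
def pvWitness_ComputeNewID : Int × Int := (321, 4)

def Spec_ComputeNewID (n : Int) (b : Int) (out : String) : Prop := out = ComputeNewID_alt n b
instance (n : Int) (b : Int) (out : String) : Decidable (Spec_ComputeNewID n b out) := by unfold Spec_ComputeNewID; infer_instance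

-- ===== CLAIM (what is proved, stated in full; the proofs are below) =====
def Claim_equal_ComputeNewID : Prop := ∀ (n : Int) (b : Int), Dom_ComputeNewID n b → Pre_ComputeNewID n b → Spec_ComputeNewID n b (ComputeNewID n b)

-- ===== LEMMAS AND PROOFS =====

theorem pvAltLoop_acc (f : Nat) : ∀ (z b : Int) (acc : List (List Char)),
    pvAltLoop f z b acc = acc ++ pvAltLoop f z b [] := by
  induction f with
  | zero => intro z b acc; simp [pvAltLoop]
  | succ f ih =>
    intro z b acc
    by_cases hz : 0 < z
    · simp only [pvAltLoop, hz, if_pos]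
      rw [ih _ _ (acc ++ _), ih _ _ ([] ++ _)]
      simp
    · simp [pvAltLoop, hz]

theorem pv_floordiv_lt (z b : Int) (hb : 2 ≤ b) (hz : 0 < z) :
    PySem.Int.floordiv z b < z := by
  have h2 : z * 2 ≤ z * b := mul_le_mul_of_nonneg_left hb (by omega)
  have : z < z * b := by omega
  rw [PySem.Int.floordiv_lt_iff_lt_mul (by omega)]
  exact this

theorem pv_floordiv_nonneg (z b : Int) (hb : 2 ≤ b) (hz : 0 ≤ z) :
    0 ≤ PySem.Int.floordiv z b := by
  rw [PySem.Int.le_floordiv_iff_mul_le (by omega)]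
  omega

theorem pv_conv_eq (b : Int) (hb : 2 ≤ b) :
    ∀ (k : Nat) (z : Int), 0 < z → z.toNat ≤ k →
      ∀ (fA fB : Nat), k ≤ fA → k ≤ fB →
        pvConvFuel fA z b = ((pvAltLoop fB z b []).reverse).flatten := by
  intro k
  induction k with
  | zero => intro z hz hk; omega
  | succ k ih =>
    intro z hz hk fA fB hfA hfB
    obtain ⟨fA', rfl⟩ : ∃ m, fA = m + 1 := ⟨fA - 1, by omega⟩
    obtain ⟨fB', rfl⟩ : ∃ m, fB = m + 1 := ⟨fB - 1, by omega⟩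
    have hd0 : 0 ≤ PySem.Int.floordiv z b := pv_floordiv_nonneg z b hb (by omega)
    have hdlt : PySem.Int.floordiv z b < z := pv_floordiv_lt z b hb hz
    have hzne : z ≠ 0 := by omega
    by_cases hd : PySem.Int.floordiv z b = 0
    · -- Digit == 0: A returns str(Remainder); B's loop runs exactly once
      simp only [pvConvFuel, pvAltLoop, hzne, hd, if_pos, hz]
      rcases fB' with _ | fB''
      · simp [pvAltLoop]
      · simp [pvAltLoop]
    · -- Digit > 0: one recursive step / one loop iteration, then the inductive hypothesis
      simp only [pvConvFuel, pvAltLoop, hzne, hd, if_false, hz, if_pos]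
      rw [pvAltLoop_acc]
      have ihd := ih (PySem.Int.floordiv z b) (by omega) (by omega) fA' fB' (by omega) (by omega)
      simp [ihd]

theorem pv_top_eq (z b : Int) (hb : 2 ≤ b) :
    ConvertB10toBb z b = (if z = 0 then ['0'] else ((pvAltLoop z.toNat z b []).reverse).flatten) := by
  by_cases h0 : z = 0
  · subst h0; simp [ConvertB10toBb, pvConvFuel]
  · rcases lt_trichotomy z 0 with hneg | h | hpos
    · -- z < 0 never occurs in Python (x ≥ y; the recursion would not terminate);
      -- both ports yield [] here: A gets fuel 0, Bs loop never runs
      have hz1 : z.toNat = 0 := by omega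
      simp [ConvertB10toBb, pvConvFuel, pvAltLoop, hz1, hneg.not_ge, h0]
    · omega
    · simp only [if_neg h0, ConvertB10toBb, if_pos (by omega : (0:Int) ≤ z)]
      exact pv_conv_eq b hb z.toNat z hpos le_rfl (z.toNat + 1) z.toNat (by omega) le_rfl

-- ===== VERDICT (by name: the statement is the Claim_ definition above) =====
theorem ComputeNewID_spec : Claim_equal_ComputeNewID := by
  intro n b _ hpre
  unfold Spec_ComputeNewID ComputeNewID ComputeNewID_alt
  obtain ⟨-, hb, -, -⟩ := hpre
  simp only [PySem.List.slice?_none_none_neg_one, Option.getD_some]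
  rw [pv_top_eq _ _ hb]
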